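-- pv_equiv track=rewrite | github.com/benediktbwimmer/job_search | backend/job_search/ingestion.py | _looks_like_indeed_block_page
-- ===== SOURCE A (Python) =====
-- def _looks_like_indeed_block_page(html_text: str) -> bool:
--     text = str(html_text or "").lower()
--     if not text:
--         return False
--     markers = [
--         "additional verification required",
--         "our systems have detected unusual traffic",
--         "verify you are human",
--         "access denied",
--         "<title>just a moment",
--         "enable javascript and cookies to continue",
--     ]
--     return any(m in text for m in markers)
-- ===== SOURCE B (Python) =====
-- _MARKERS = (
--     "additional verification required",
--     "our systems have detected unusual traffic",
--     "verify you are human",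
--     "access denied",
--     "<title>just a moment",
--     "enable javascript and cookies to continue",
-- )
--
--
-- def _looks_like_indeed_block_page(html_text: str) -> bool:
--     # Single left-to-right scan: at each position ask whether any marker starts there.
--     text = str(html_text or "").lower()
--     for i in range(len(text)):
--         if text.startswith(_MARKERS, i):
--             return True
--     return False
-- ===== Notes on version B (the rewrite author's own statement) =====
-- stated objective: alternative
-- what changed: Replaces the six independent per-marker substring searches with one left-to-right positional scan that asks at each index whether any marker starts there, so the separate empty-text guard disappears.
import Mathlib
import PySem

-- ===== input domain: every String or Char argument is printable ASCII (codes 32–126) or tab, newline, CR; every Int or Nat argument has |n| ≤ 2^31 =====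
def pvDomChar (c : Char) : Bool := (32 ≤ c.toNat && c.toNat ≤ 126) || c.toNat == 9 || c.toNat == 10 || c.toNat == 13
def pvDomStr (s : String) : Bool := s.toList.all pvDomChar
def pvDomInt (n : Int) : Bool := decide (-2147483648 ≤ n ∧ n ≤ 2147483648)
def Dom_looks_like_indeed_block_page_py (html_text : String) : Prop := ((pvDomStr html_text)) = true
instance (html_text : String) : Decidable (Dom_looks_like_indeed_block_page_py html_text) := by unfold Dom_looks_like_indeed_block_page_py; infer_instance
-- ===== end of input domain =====

-- B replaces six independent substring searches with one left-to-right positional scan; alternative decomposition, same cost.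


-- ===== PORT A =====
def pvMarkers : List String :=
  [ "additional verification required"
  , "our systems have detected unusual traffic"
  , "verify you are human"
  , "access denied"
  , "<title>just a moment"
  , "enable javascript and cookies to continue" ]

def looks_like_indeed_block_page_py (html_text : String) : Bool :=
  let text := PySem.Str.lower html_text
  if text == "" then false
  else pvMarkers.any (fun m => PySem.Str.isIn m text)

-- ===== PORT B =====
-- the markers as char lists (B's module-level _MARKERS tuple)
def pvMarkersChars : List (List Char) := pvMarkers.map String.toList

-- the scan loop of B: at each position, does any marker start here?
def pvScan (cs : List Char) : Bool :=
  match cs with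
  | [] => false
  | _ :: rest => pvMarkersChars.any (fun m => m.isPrefixOf cs) || pvScan rest

def looks_like_indeed_block_page_py_alt (html_text : String) : Bool :=
  pvScan (PySem.Str.lower html_text).toList

-- ===== PRECONDITION & SPEC =====
def Spec_looks_like_indeed_block_page_py (html_text : String) (out : Bool) : Prop := out = looks_like_indeed_block_page_py_alt html_text
instance (html_text : String) (out : Bool) : Decidable (Spec_looks_like_indeed_block_page_py html_text out) := by unfold Spec_looks_like_indeed_block_page_py; infer_instance

-- ===== CLAIM (what is proved, stated in full; the proofs are below) =====
def Claim_equal_looks_like_indeed_block_page_py : Prop := ∀ (html_text : String), Dom_looks_like_indeed_block_page_py html_text → Spec_looks_like_indeed_block_page_py html_text (looks_like_indeed_block_page_py html_text)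

-- ===== LEMMAS AND PROOFS =====

-- the scan finds a match iff some (nonempty) marker is an infix of the text
theorem pvScan_iff (cs : List Char) :
    pvScan cs = (pvMarkersChars.any (fun m => decide (m <:+: cs))) := by
  induction cs with
  | nil =>
    rfl
  | cons c rest ih =>
    show (pvMarkersChars.any (fun m => m.isPrefixOf (c :: rest)) || pvScan rest)
        = pvMarkersChars.any (fun m => decide (m <:+: c :: rest))
    rw [ih, Bool.eq_iff_iff]
    simp only [Bool.or_eq_true, List.any_eq_true, decide_eq_true_eq,
      List.isPrefixOf_iff_prefix]
    constructor
    · rintro (⟨m, hm, hp⟩ | ⟨m, hm, hi⟩)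
      · exact ⟨m, hm, hp.isInfix⟩
      · exact ⟨m, hm, hi.trans (List.suffix_cons c rest).isInfix⟩
    · rintro ⟨m, hm, hi⟩
      rcases List.infix_cons_iff.mp hi with hp | hi'
      · exact Or.inl ⟨m, hm, hp⟩
      · exact Or.inr ⟨m, hm, hi'⟩

-- ===== VERDICT (by name: the statement is the Claim_ definition above) =====
theorem looks_like_indeed_block_page_py_spec : Claim_equal_looks_like_indeed_block_page_py := by
  intro html_text _
  unfold Spec_looks_like_indeed_block_page_py looks_like_indeed_block_page_py looks_like_indeed_block_page_py_alt
  rw [pvScan_iff]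
  by_cases h : PySem.Str.lower html_text = ""
  · simp [h, pvMarkersChars]
    decide
  · simp only [beq_iff_eq, if_neg h, pvMarkersChars, List.any_map]
    rw [Bool.eq_iff_iff]
    simp only [List.any_eq_true, Function.comp, decide_eq_true_eq, PySem.Str.isIn_iff_infix]
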